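-- pv_equiv track=rewrite | github.com/yilmazbingo/algorithm-solutions-in-python | strings/sort_numbers_then_letters.py | sort_mixed
-- ===== SOURCE A (Python) =====
-- def sort_mixed(string:str)->str:
--     numbers=[]
--     strings=[]
--     for i in range(len(string)):
--         if  string[i].isnumeric():
--             numbers.append(string[i])
--         else:
--             strings.append(string[i])
--     return "".join(sorted(numbers))+"".join(sorted(strings))
-- ===== SOURCE B (Python) =====
-- def sort_mixed(string: str) -> str:
--     # counting sort over the ASCII alphabet: digit codes first, then the rest
--     digits = "".join(chr(c) * string.count(chr(c)) for c in range(48, 58))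
--     others = "".join(chr(c) * string.count(chr(c))
--                      for c in range(128) if not 48 <= c < 58)
--     return digits + others
-- ===== Notes on version B (the rewrite author's own statement) =====
-- stated objective: alternative
-- what changed: replaced partition-then-comparison-sort with a counting sort over the 128-code ASCII alphabet: per-code occurrence counts are emitted in code order (digit codes 48-57 first, then the remaining codes), so no comparison sort is performed; on near-uniform inputs Timsort's linear best case makes A comparable, so no speed is claimed
import Mathlib
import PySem

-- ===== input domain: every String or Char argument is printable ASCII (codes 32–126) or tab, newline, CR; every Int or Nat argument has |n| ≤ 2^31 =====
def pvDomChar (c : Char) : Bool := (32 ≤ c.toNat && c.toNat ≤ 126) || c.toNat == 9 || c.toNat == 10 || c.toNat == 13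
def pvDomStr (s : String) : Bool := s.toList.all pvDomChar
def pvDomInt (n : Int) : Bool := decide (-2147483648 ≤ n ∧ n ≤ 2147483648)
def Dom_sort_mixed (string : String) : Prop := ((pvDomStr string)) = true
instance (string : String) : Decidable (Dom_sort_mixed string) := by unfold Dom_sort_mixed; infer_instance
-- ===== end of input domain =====

-- B replaces A's partition + two comparison sorts by a counting sort over the 128-code
-- ASCII alphabet (objective: alternative algorithm, same measured cost).

-- ===== PORT A =====
-- 'string[i].isnumeric()' ported as PySem.Chars.isdigit: exact on the ASCII domain Dom,
-- where isnumeric and isdigit are both true exactly on '0'..'9'.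
def sort_mixed (string : String) : String :=
  let parts := string.toList.foldl
    (fun (acc : List Char × List Char) c =>
      if PySem.Chars.isdigit c then (acc.1 ++ [c], acc.2) else (acc.1, acc.2 ++ [c]))
    ([], [])
  String.ofList ((PySem.List.sorted parts.1 (fun c => c)) ++ (PySem.List.sorted parts.2 (fun c => c)))

-- ===== PORT B =====
-- chr(c)
def pvChr (c : Int) : Char := Char.ofNat c.toNat

-- ''.join(chr(c) * string.count(chr(c)) for c in codes)
def pvBlocks (cs : List Char) (codes : List Int) : List Char :=
  codes.flatMap (fun c => List.replicate (cs.count (pvChr c)) (pvChr c))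

def sort_mixed_alt (string : String) : String :=
  let cs := string.toList
  let digits := pvBlocks cs (PySem.List.pyRange 48 58 1)
  let others := pvBlocks cs ((PySem.List.pyRange 0 128 1).filter (fun c => !(48 ≤ c && c < 58)))
  String.ofList (digits ++ others)

-- ===== PRECONDITION & SPEC =====
def Spec_sort_mixed (string : String) (out : String) : Prop := out = sort_mixed_alt string
instance (string : String) (out : String) : Decidable (Spec_sort_mixed string out) := by unfold Spec_sort_mixed; infer_instance

-- ===== CLAIM (what is proved, stated in full; the proofs are below) =====
def Claim_equal_sort_mixed : Prop := ∀ (string : String), Dom_sort_mixed string → Spec_sort_mixed string (sort_mixed string)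

-- ===== LEMMAS AND PROOFS =====

theorem pvChr_toNat {c : Int} (h0 : 0 ≤ c) (h1 : c < 128) : (pvChr c).toNat = c.toNat := by
  have hv : c.toNat.isValidChar := Or.inl (by omega)
  simp [pvChr, Char.toNat_ofNat, hv]

theorem pvChr_eq_self (x : Char) : pvChr (x.toNat : Int) = x := by
  simp [pvChr, Char.ofNat_toNat]

theorem pvChr_inj {c d : Int} (hc0 : 0 ≤ c) (hc1 : c < 128) (hd0 : 0 ≤ d) (hd1 : d < 128)
    (h : pvChr c = pvChr d) : c = d := by
  have := congrArg Char.toNat h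
  rw [pvChr_toNat hc0 hc1, pvChr_toNat hd0 hd1] at this
  omega

theorem pvBlocks_congr (codes : List Int) (l l' : List Char)
    (h : ∀ c ∈ codes, l.count (pvChr c) = l'.count (pvChr c)) :
    pvBlocks l codes = pvBlocks l' codes := by
  induction codes with
  | nil => rfl
  | cons c rest ih =>
    simp only [pvBlocks, List.flatMap_cons] at *
    rw [h c (by simp), ih (fun c' hc' => h c' (by simp [hc']))]

-- the concatenated count blocks are a permutation of any list l whose codes all lie in `codes`
theorem pvBlocks_perm (codes : List Int) (l : List Char)
    (hv : ∀ c ∈ codes, 0 ≤ c ∧ c < 128)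
    (hnd : codes.Nodup)
    (hmem : ∀ x ∈ l, (x.toNat : Int) ∈ codes) :
    (pvBlocks l codes).Perm l := by
  induction codes generalizing l with
  | nil =>
    cases l with
    | nil => simp [pvBlocks]
    | cons x t => exact absurd (hmem x (by simp)) (by simp)
  | cons c rest ih =>
    have hc := hv c (by simp)
    have hcount : ∀ c' ∈ rest,
        List.count (pvChr c') l = List.count (pvChr c') (l.filter (fun x => !(x == pvChr c))) := by
      intro c' hc'
      have hc'' := hv c' (by simp [hc'])
      have hne : pvChr c' ≠ pvChr c := by
        intro he
        have : c' = c := pvChr_inj hc''.1 hc''.2 hc.1 hc.2 he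
        exact (by simpa using hnd.notMem (by simpa [this] using hc') : False)
      rw [List.count_filter (by simpa using hne)]
    have hmem' : ∀ x ∈ l.filter (fun x => !(x == pvChr c)), (x.toNat : Int) ∈ rest := by
      intro x hx
      rw [List.mem_filter] at hx
      have hne : x ≠ pvChr c := by simpa using hx.2
      rcases List.mem_cons.mp (hmem x hx.1) with h | h
      · exact absurd (by rw [← pvChr_eq_self x, h]) hne
      · exact h
    have ihp := ih (l.filter (fun x => !(x == pvChr c)))
      (fun c' hc' => hv c' (List.mem_cons_of_mem _ hc')) hnd.of_cons hmem'
    have hrest : pvBlocks l rest = pvBlocks (l.filter (fun x => !(x == pvChr c))) rest :=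
      pvBlocks_congr rest _ _ hcount
    have he1 : pvBlocks l (c :: rest)
        = List.filter (fun x => x == pvChr c) l
          ++ pvBlocks (l.filter (fun x => !(x == pvChr c))) rest := by
      simp only [pvBlocks] at hrest ⊢
      rw [List.flatMap_cons, ← hrest, List.filter_beq]
    rw [he1]
    exact (List.Perm.append_left _ ihp).trans (List.filter_append_perm _ l)

-- the concatenated count blocks are weakly increasing when the codes are strictly increasing
theorem pvBlocks_pairwise (l : List Char) (codes : List Int)
    (hv : ∀ c ∈ codes, 0 ≤ c ∧ c < 128)
    (hp : codes.Pairwise (· < ·)) :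
    (pvBlocks l codes).Pairwise (· ≤ ·) := by
  induction codes with
  | nil => simp [pvBlocks]
  | cons c rest ih =>
    have hc := hv c (by simp)
    simp only [pvBlocks, List.flatMap_cons] at *
    rw [List.pairwise_append]
    refine ⟨List.pairwise_replicate.mpr (Or.inr le_rfl), ?_, ?_⟩
    · exact ih (fun c' hc' => hv c' (by simp [hc'])) hp.of_cons
    · intro a ha b hb
      have ha' : a = pvChr c := (List.mem_replicate.mp ha).2
      rw [List.mem_flatMap] at hb
      obtain ⟨c', hc', hb'⟩ := hb
      have hb'' : b = pvChr c' := (List.mem_replicate.mp hb').2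
      have hcc' : c < c' := List.rel_of_pairwise_cons hp hc'
      have hvc' := hv c' (by simp [hc'])
      subst ha' hb''
      apply Char.le_def.mpr
      apply UInt32.le_iff_toNat_le.mpr
      have e1 : (pvChr c).val.toNat = (pvChr c).toNat := rfl
      have e2 : (pvChr c').val.toNat = (pvChr c').toNat := rfl
      rw [e1, e2, pvChr_toNat hc.1 hc.2, pvChr_toNat hvc'.1 hvc'.2]
      omega

-- counting over the whole list agrees with counting over the filtered part as long as
-- every code in `codes` satisfies the filter
theorem pvBlocks_filter (cs : List Char) (p : Char → Bool) (codes : List Int)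
    (h : ∀ c ∈ codes, p (pvChr c) = true) :
    pvBlocks cs codes = pvBlocks (cs.filter p) codes :=
  pvBlocks_congr codes cs (cs.filter p)
    (fun c hc => (List.count_filter (h c hc)).symm)

-- the count blocks over increasing codes ARE Python's sorted of the corresponding sublist
theorem pvBlocks_sorted (cs l : List Char) (codes : List Int) (p : Char → Bool)
    (hl : l = cs.filter p)
    (hv : ∀ c ∈ codes, 0 ≤ c ∧ c < 128)
    (hnd : codes.Nodup) (hp : codes.Pairwise (· < ·))
    (hfilt : ∀ c ∈ codes, p (pvChr c) = true)
    (hmem : ∀ x ∈ l, (x.toNat : Int) ∈ codes) :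
    pvBlocks cs codes = PySem.List.sorted l (fun c => c) := by
  have h1 : pvBlocks cs codes = pvBlocks l codes := by
    rw [hl]; exact pvBlocks_filter cs p codes hfilt
  rw [h1]
  exact (PySem.List.sorted_id_eq_of_perm_of_pairwise l (pvBlocks l codes)
    (pvBlocks_perm codes l hv hnd hmem) (pvBlocks_pairwise l codes hv hp)).symm

-- A's accumulating loop is the pair of filters
theorem foldl_partition (l : List Char) (a b : List Char) :
    l.foldl (fun (acc : List Char × List Char) c =>
      if PySem.Chars.isdigit c then (acc.1 ++ [c], acc.2) else (acc.1, acc.2 ++ [c])) (a, b)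
    = (a ++ l.filter PySem.Chars.isdigit, b ++ l.filter (fun c => !PySem.Chars.isdigit c)) := by
  induction l generalizing a b with
  | nil => simp
  | cons x t ih =>
    by_cases hx : PySem.Chars.isdigit x <;> simp [hx, ih]

theorem isdigit_toNat (ch : Char) :
    PySem.Chars.isdigit ch = true ↔ (48 ≤ ch.toNat ∧ ch.toNat ≤ 57) := by
  have h0 : ('0').toNat = 48 := rfl
  have h9 : ('9').toNat = 57 := rfl
  simp only [PySem.Chars.isdigit, Bool.and_eq_true, decide_eq_true_eq]
  rw [Char.le_def, Char.le_def, UInt32.le_iff_toNat_le, UInt32.le_iff_toNat_le]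
  have e0 : ('0').val.toNat = 48 := rfl
  have e9 : ('9').val.toNat = 57 := rfl
  have ec : ch.val.toNat = ch.toNat := rfl
  rw [e0, e9, ec]

-- ===== VERDICT (by name: the statement is the Claim_ definition above) =====
theorem sort_mixed_spec : Claim_equal_sort_mixed := by
  intro string hdom
  unfold Spec_sort_mixed sort_mixed sort_mixed_alt
  simp only [foldl_partition, List.nil_append]
  have hdom' : ∀ x ∈ string.toList, x.toNat < 128 := by
    intro x hx
    have := List.all_eq_true.mp hdom x hx
    simp [pvDomChar] at this
    omega
  have hd : pvBlocks string.toList (PySem.List.pyRange 48 58 1)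
      = PySem.List.sorted (string.toList.filter PySem.Chars.isdigit) (fun c => c) := by
    apply pvBlocks_sorted string.toList _ _ PySem.Chars.isdigit rfl
    · intro c hc
      have := (PySem.List.mem_pyRange_iff_of_pos (by norm_num) c).mp hc
      omega
    · exact PySem.List.nodup_pyRange_one 48 58
    · exact PySem.List.pairwise_lt_pyRange_one 48 58
    · intro c hc
      have h := (PySem.List.mem_pyRange_iff_of_pos (by norm_num) c).mp hc
      have := pvChr_toNat (by omega : (0:Int) ≤ c) (by omega : c < 128)
      exact (isdigit_toNat _).mpr (by omega)
    · intro x hx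
      rw [List.mem_filter] at hx
      have := (isdigit_toNat x).mp hx.2
      rw [PySem.List.mem_pyRange_iff_of_pos (by norm_num)]
      refine ⟨by omega, by omega, by simp⟩
  have hs : pvBlocks string.toList ((PySem.List.pyRange 0 128 1).filter (fun c => !(48 ≤ c && c < 58)))
      = PySem.List.sorted (string.toList.filter (fun c => !PySem.Chars.isdigit c)) (fun c => c) := by
    apply pvBlocks_sorted string.toList _ _ (fun c => !PySem.Chars.isdigit c) rfl
    · intro c hc
      have := (PySem.List.mem_pyRange_iff_of_pos (by norm_num) c).mp (List.mem_filter.mp hc).1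
      omega
    · exact (PySem.List.nodup_pyRange_one 0 128).filter _
    · exact (PySem.List.pairwise_lt_pyRange_one 0 128).filter _
    · intro c hc
      rw [List.mem_filter] at hc
      have hr := (PySem.List.mem_pyRange_iff_of_pos (by norm_num) c).mp hc.1
      have hcond : ¬ (48 ≤ c ∧ c < 58) := by
        have := hc.2; simp at this; omega
      have ht := pvChr_toNat (by omega : (0:Int) ≤ c) (by omega : c < 128)
      simp only [Bool.not_eq_true']
      rw [← Bool.not_eq_true]
      intro hdig
      have := (isdigit_toNat _).mp hdig
      omega
    · intro x hx
      rw [List.mem_filter] at hx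
      have hnd : ¬ (48 ≤ x.toNat ∧ x.toNat ≤ 57) := by
        intro h
        have := (isdigit_toNat x).mpr h
        simp [this] at hx
      have hlt := hdom' x hx.1
      rw [List.mem_filter]
      constructor
      · rw [PySem.List.mem_pyRange_iff_of_pos (by norm_num)]
        refine ⟨by omega, by omega, by simp⟩
      · simp; omega
  rw [hd, hs]
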